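-- pv_equiv track=rewrite | github.com/isysoev/decoding_modeling | decoding/special_cases.py | find_double_consonant_idxs
-- ===== SOURCE A (Python) =====
-- def find_double_consonant_idxs(word):
--     """
--     Returns a List of ints,
--         the idxs of the non-first repeated consonant
--             in word, a str.
--     """
--     remove_idxs = []
--     vowels = ['a', 'e', 'i', 'o', 'u']
--     for idx in range(len(word)):
--         if idx == 0:
--             continue
--         if word[idx-1] == word[idx] and not (word[idx] in vowels):
--             remove_idxs.append(idx)
--
--     return remove_idxs
-- ===== SOURCE B (Python) =====
-- def find_double_consonant_idxs(word):
--     """Run-based rewrite: scan maximal runs of identical characters and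
--     emit all trailing indices of each non-vowel run."""
--     remove_idxs = []
--     n = len(word)
--     pos = 0
--     while pos < n:
--         ch = word[pos]
--         end = pos + 1
--         while end < n and word[end] == ch:
--             end += 1
--         if ch not in 'aeiou':
--             remove_idxs.extend(range(pos + 1, end))
--         pos = end
--     return remove_idxs
-- ===== Notes on version B (the rewrite author's own statement) =====
-- stated objective: alternative
-- what changed: Replaced the per-index adjacent-pair comparison loop with a run-based scan: an outer loop walks maximal runs of identical characters and, for each non-vowel run, emits all its trailing indices at once with a bulk range extend.
import Mathlib
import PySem

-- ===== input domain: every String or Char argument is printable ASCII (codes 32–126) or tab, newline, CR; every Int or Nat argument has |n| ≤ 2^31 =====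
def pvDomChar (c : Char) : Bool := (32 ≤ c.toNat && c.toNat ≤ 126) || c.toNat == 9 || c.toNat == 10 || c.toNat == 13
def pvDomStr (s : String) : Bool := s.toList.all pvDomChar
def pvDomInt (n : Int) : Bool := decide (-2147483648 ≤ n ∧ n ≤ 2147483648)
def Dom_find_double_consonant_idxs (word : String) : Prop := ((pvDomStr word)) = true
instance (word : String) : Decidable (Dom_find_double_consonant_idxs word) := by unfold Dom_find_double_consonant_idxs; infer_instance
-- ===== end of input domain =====

-- B rewrites A's adjacent-pair scan as a run-based scan (maximal runs of equal
-- characters, emitting all trailing indices of each non-vowel run); alternative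
-- decomposition, same O(n) cost, return value proved equal on all inputs.

-- ===== PORT A =====
-- Literal port of A: for idx in range(len(word)): skip idx 0, append idx when
-- word[idx-1] == word[idx] and word[idx] not a vowel.  Indexing is always in
-- range here, so pyGetD's default ' ' is never used.
def find_double_consonant_idxs (word : String) : List Int :=
  let cs := word.toList
  let vowels : List Char := ['a', 'e', 'i', 'o', 'u']
  (PySem.List.pyRange 0 (cs.length : Int) 1).foldl
    (fun remove_idxs idx =>
      if idx == 0 then remove_idxs
      else if PySem.List.pyGetD cs (idx - 1) ' ' == PySem.List.pyGetD cs idx ' '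
              && !(vowels.contains (PySem.List.pyGetD cs idx ' ')) then
        remove_idxs ++ [idx]
      else remove_idxs) []

-- ===== PORT B =====
-- Outer while-loop of Source B: one step per maximal run.  The inner while-loop
-- (advancing `end` over the run) is the takeWhile; `end = pos + 1 + run length`.
def altRun (cs : List Char) (pos : Int) : List Int :=
  match cs with
  | [] => []
  | ch :: rest =>
    let endPos : Int := pos + 1 + ((rest.takeWhile (· == ch)).length : Int)
    (if (['a', 'e', 'i', 'o', 'u'] : List Char).contains ch then []
     else PySem.List.pyRange (pos + 1) endPos 1)
      ++ altRun (rest.dropWhile (· == ch)) endPos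
termination_by cs.length
decreasing_by
  simp only [List.length_cons]
  exact Nat.lt_succ_of_le (List.length_dropWhile_le _ _)

def find_double_consonant_idxs_alt (word : String) : List Int :=
  altRun word.toList 0

-- ===== PRECONDITION & SPEC =====
def Spec_find_double_consonant_idxs (word : String) (out : List Int) : Prop := out = find_double_consonant_idxs_alt word
instance (word : String) (out : List Int) : Decidable (Spec_find_double_consonant_idxs word out) := by unfold Spec_find_double_consonant_idxs; infer_instance

-- ===== CLAIM (what is proved, stated in full; the proofs are below) =====
def Claim_equal_find_double_consonant_idxs : Prop := ∀ (word : String), Dom_find_double_consonant_idxs word → Spec_find_double_consonant_idxs word (find_double_consonant_idxs word)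

-- ===== LEMMAS AND PROOFS =====

-- Common midpoint: adjacent-pair recursion carrying the absolute index.
def pairSpec : List Char → Int → List Int
  | [], _ => []
  | [_], _ => []
  | a :: b :: rest, i =>
      (if a == b && !((['a', 'e', 'i', 'o', 'u'] : List Char).contains b)
       then [i + 1] else []) ++ pairSpec (b :: rest) (i + 1)

lemma pairSpec_shift (cs : List Char) : ∀ i : Int, pairSpec cs i = (pairSpec cs 0).map (· + i) := by
  induction cs with
  | nil => intro i; simp [pairSpec]
  | cons a tl ih =>
    intro i
    cases tl with
    | nil => simp [pairSpec]
    | cons b r =>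
      simp only [pairSpec]
      rw [ih (i + 1), ih (0 + 1), List.map_append, List.map_map]
      congr 1
      · split <;> simp [add_comm]
      · apply List.map_congr_left; intro x _; simp; ring

lemma pyGetD_cons_shift (a : Char) (xs : List Char) (i : Int) (d : Char) (h : 1 ≤ i) :
    PySem.List.pyGetD (a :: xs) i d = PySem.List.pyGetD xs (i - 1) d := by
  obtain ⟨k, hk⟩ : ∃ k : Nat, i = (k : Int) + 1 := ⟨(i - 1).toNat, by omega⟩
  subst hk
  have h1 : (k : Int) + 1 = ((k + 1 : Nat) : Int) := by push_cast; ring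
  rw [h1, PySem.List.pyGetD_natCast]
  simp [PySem.List.pyGetD_natCast]

lemma pyRange_shift (a b : Int) :
    PySem.List.pyRange (a + 1) (b + 1) 1 = (PySem.List.pyRange a b 1).map (· + 1) := by
  simp only [PySem.List.pyRange_one, List.map_map]
  have : b + 1 - (a + 1) = b - a := by ring
  rw [this]
  apply List.map_congr_left; intro x _; simp; ring

-- A's filtered-range form equals the pair recursion.
lemma filter_eq_pairSpec (cs : List Char) :
    (PySem.List.pyRange 1 (cs.length : Int) 1).filter
      (fun j => PySem.List.pyGetD cs (j - 1) ' ' == PySem.List.pyGetD cs j ' '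
                && !((['a', 'e', 'i', 'o', 'u'] : List Char).contains (PySem.List.pyGetD cs j ' ')))
      = pairSpec cs 0 := by
  induction cs with
  | nil => simp [pairSpec, PySem.List.pyRange_one_eq_nil]
  | cons a tl ih =>
    cases tl with
    | nil => simp [pairSpec, PySem.List.pyRange_one_eq_nil]
    | cons b r =>
      have hlen : ((a :: b :: r).length : Int) = (r.length : Int) + 2 := by simp; ring
      rw [hlen, PySem.List.pyRange_one_cons (by omega)]
      have h2 : (1 : Int) + 1 = 2 := by norm_num
      rw [h2]
      have hsplit : PySem.List.pyRange 2 ((r.length : Int) + 2) 1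
          = (PySem.List.pyRange 1 ((r.length : Int) + 1) 1).map (· + 1) := by
        have := pyRange_shift 1 ((r.length : Int) + 1)
        simpa using this
      rw [List.filter_cons, hsplit, List.filter_map]
      have hcond : ∀ j ∈ PySem.List.pyRange 1 ((r.length : Int) + 1) 1,
          ((fun j => PySem.List.pyGetD (a :: b :: r) (j - 1) ' ' == PySem.List.pyGetD (a :: b :: r) j ' '
                && !((['a', 'e', 'i', 'o', 'u'] : List Char).contains (PySem.List.pyGetD (a :: b :: r) j ' '))) ∘ (· + 1)) j
          = (fun j => PySem.List.pyGetD (b :: r) (j - 1) ' ' == PySem.List.pyGetD (b :: r) j ' '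
                && !((['a', 'e', 'i', 'o', 'u'] : List Char).contains (PySem.List.pyGetD (b :: r) j ' '))) j := by
        intro j hj
        have hj1 : 1 ≤ j := (PySem.List.mem_pyRange_one.mp hj).1
        simp only [Function.comp]
        rw [pyGetD_cons_shift a _ (j + 1) ' ' (by omega),
            pyGetD_cons_shift a _ (j + 1 - 1) ' ' (by omega)]
        ring_nf
      rw [List.filter_congr hcond]
      have hlen2 : ((b :: r).length : Int) = (r.length : Int) + 1 := by simp
      rw [hlen2] at ih
      rw [ih]
      have h1get : PySem.List.pyGetD (a :: b :: r) ((1 : Int) - 1) ' ' = a := by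
        norm_num [PySem.List.pyGetD_zero_cons]
      have h2get : PySem.List.pyGetD (a :: b :: r) (1 : Int) ' ' = b := by
        rw [pyGetD_cons_shift a _ 1 ' ' le_rfl]
        norm_num [PySem.List.pyGetD_zero_cons]
      simp only [pairSpec, h1get, h2get, ← pairSpec_shift]
      split <;> simp

-- B's run recursion equals the pair recursion.
lemma altRun_eq_pairSpec_aux : ∀ (n : Nat) (cs : List Char) (pos : Int), cs.length ≤ n →
    altRun cs pos = pairSpec cs pos := by
  intro n
  induction n with
  | zero => intro cs pos h; rw [List.length_eq_zero_iff.mp (Nat.le_zero.mp h)]; simp [altRun, pairSpec]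
  | succ m ih =>
    intro cs pos h
    match cs with
    | [] => simp [altRun, pairSpec]
    | [ch] =>
      simp [altRun, pairSpec, PySem.List.pyRange_one_eq_nil (le_refl (pos + 1))]
    | ch :: b :: r =>
      have hIH : altRun (b :: r) (pos + 1) = pairSpec (b :: r) (pos + 1) :=
        ih _ _ (by simp at h ⊢; omega)
      by_cases hb : b = ch
      · subst hb
        have htw : (b :: r).takeWhile (· == b) = b :: r.takeWhile (· == b) :=
          List.takeWhile_cons_of_pos (by simp)
        have hdw : (b :: r).dropWhile (· == b) = r.dropWhile (· == b) :=
          List.dropWhile_cons_of_pos (by simp)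
        have hE : pos + 1 + (((b :: r).takeWhile (· == b)).length : Int)
            = (pos + 1) + 1 + ((r.takeWhile (· == b)).length : Int) := by
          rw [htw]; push_cast [List.length_cons]; ring
        rw [altRun, pairSpec, hdw, hE]
        rw [altRun] at hIH
        by_cases hv : (['a', 'e', 'i', 'o', 'u'] : List Char).contains b = true
        · rw [if_pos hv] at *
          have hc : (b == b && !(['a', 'e', 'i', 'o', 'u'] : List Char).contains b) = false := by
            have hv' : b = 'a' ∨ b = 'e' ∨ b = 'i' ∨ b = 'o' ∨ b = 'u' := by simpa using hv
            simp; tauto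
          rw [hc, if_neg Bool.false_ne_true, List.nil_append]
          exact hIH
        · rw [if_neg hv] at *
          rw [← hIH]
          rw [PySem.List.pyRange_one_cons
            (by omega : pos + 1 < pos + 1 + 1 + ((r.takeWhile (· == b)).length : Int))]
          have hc : (b == b && !(['a', 'e', 'i', 'o', 'u'] : List Char).contains b) = true := by
            simp only [Bool.not_eq_true] at hv
            simp; simpa using hv
          rw [hc, if_pos rfl]
          simp
      · have htw : (b :: r).takeWhile (· == ch) = [] :=
          List.takeWhile_cons_of_neg (by simp [hb])
        have hdw : (b :: r).dropWhile (· == ch) = b :: r :=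
          List.dropWhile_cons_of_neg (by simp [hb])
        rw [altRun, pairSpec, hdw, htw]
        have hcb : (ch == b) = false := by
          simp only [beq_eq_false_iff_ne, ne_eq]; exact fun h' => hb h'.symm
        rw [if_neg (by simp [hcb] : ¬ ((ch == b && !(['a', 'e', 'i', 'o', 'u'] : List Char).contains b) = true))]
        simp only [List.length_nil, Nat.cast_zero, add_zero, List.nil_append]
        rw [PySem.List.pyRange_one_eq_nil (le_refl (pos + 1))]
        simp only [List.nil_append, ite_self]
        exact hIH

lemma altRun_eq_pairSpec (cs : List Char) (pos : Int) : altRun cs pos = pairSpec cs pos :=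
  altRun_eq_pairSpec_aux cs.length cs pos le_rfl

-- A's foldl written as a filtered range.
lemma A_eq_filter (cs : List Char) :
    (PySem.List.pyRange 0 (cs.length : Int) 1).foldl
      (fun remove_idxs idx =>
        if idx == 0 then remove_idxs
        else if PySem.List.pyGetD cs (idx - 1) ' ' == PySem.List.pyGetD cs idx ' '
                && !((['a', 'e', 'i', 'o', 'u'] : List Char).contains (PySem.List.pyGetD cs idx ' ')) then
          remove_idxs ++ [idx]
        else remove_idxs) []
    = (PySem.List.pyRange 1 (cs.length : Int) 1).filter
        (fun j => PySem.List.pyGetD cs (j - 1) ' ' == PySem.List.pyGetD cs j ' '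
                  && !((['a', 'e', 'i', 'o', 'u'] : List Char).contains (PySem.List.pyGetD cs j ' '))) := by
  have hfun : (fun (remove_idxs : List Int) (idx : Int) =>
        if idx == 0 then remove_idxs
        else if PySem.List.pyGetD cs (idx - 1) ' ' == PySem.List.pyGetD cs idx ' '
                && !((['a', 'e', 'i', 'o', 'u'] : List Char).contains (PySem.List.pyGetD cs idx ' ')) then
          remove_idxs ++ [idx]
        else remove_idxs)
      = (fun remove_idxs idx =>
        if (!(idx == 0)
            && (PySem.List.pyGetD cs (idx - 1) ' ' == PySem.List.pyGetD cs idx ' '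
                && !((['a', 'e', 'i', 'o', 'u'] : List Char).contains (PySem.List.pyGetD cs idx ' ')))) then
          remove_idxs ++ [idx]
        else remove_idxs) := by
    funext acc idx
    by_cases h : idx = 0 <;> simp [h]
  rw [hfun, PySem.List.foldl_append_if_eq_filter, List.nil_append]
  cases cs with
  | nil => simp [PySem.List.pyRange_one_eq_nil]
  | cons a tl =>
    rw [PySem.List.pyRange_one_cons (by exact_mod_cast Nat.succ_pos tl.length), List.filter_cons]
    simp only [beq_self_eq_true, Bool.not_true, Bool.false_and, if_neg Bool.false_ne_true]
    have h01 : (0 : Int) + 1 = 1 := by norm_num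
    rw [h01]
    apply List.filter_congr
    intro j hj
    have hj1 : 1 ≤ j := (PySem.List.mem_pyRange_one.mp hj).1
    have : (j == (0 : Int)) = false := by simp; omega
    simp [this]

-- ===== VERDICT (by name: the statement is the Claim_ definition above) =====
theorem find_double_consonant_idxs_spec : Claim_equal_find_double_consonant_idxs := by
  intro word _
  unfold Spec_find_double_consonant_idxs find_double_consonant_idxs find_double_consonant_idxs_alt
  rw [altRun_eq_pairSpec, ← filter_eq_pairSpec]
  exact A_eq_filter word.toList
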